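-- pv_equiv track=rewrite | github.com/Hieu-L/flipflop | program.py | ve_st
-- ===== SOURCE A (Python) =====
-- def conflict_free(argset,atks) :
--     """
--     Return True or False \n
--     argset : a list of arguments | ex : [ 'A' , 'B' ] \n
--     atks : a list of tuples of arguments, representing attacks | ex: [ ('Atk1','Def1') , ('Atk2','Def2') ] \n\n
--     checks if 'argset' is conflict free.
--     """
--
--     for s in argset :
--         for a,d in atks :
--             # if 's' attacks an argument within the set
--             if (s==a) and (d in argset) :
--                 return False
--
--     return True
--
-- def ve_st(args, atks, s) :
--     """
--     Return True or False \n\n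
--     args : a list of all arguments | ex : [ 'A' , 'B' ] \n
--     atks : a list of tuples of arguments, representing attacks | ex: [ ('Atk1','Def1') , ('Atk2','Def2') ] \n
--     s : a subset of args \n\n
--     checks if 's' is a stable extension of F.
--     """
--     # is s conflict-free ?
--     if conflict_free(s, atks):
--         # list to sets (for difference operator)
--         setArgs = set(args)
--         setS = set(s)
--         diff = setArgs.difference(s)
--
--         # complement attack check
--         for a in diff:
--             complement = False
--             for b in setS:
--                 if (b,a) in atks:
--                     complement = True
--
--             # no complement attack found
--             if not complement:
--                 return False
--         # there is a complement attack for each node in args - s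
--         return True
--
--     return False
-- ===== SOURCE B (Python) =====
-- def ve_st(args, atks, s):
--     ss = set(s)
--     attacked = set()
--     for a, d in atks:
--         if a in ss:
--             if d in ss:
--                 return False  # conflict inside s
--             attacked.add(d)
--     for x in args:
--         if x not in ss and x not in attacked:
--             return False
--     return True
-- ===== Notes on version B (the rewrite author's own statement) =====
-- stated objective: faster
-- what changed: B makes one pass over atks building the set of arguments attacked from s (detecting a conflict inside s during that same pass), then checks each arg by set membership, instead of A's per-element rescans of s and of the atks list.
import Mathlib
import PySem

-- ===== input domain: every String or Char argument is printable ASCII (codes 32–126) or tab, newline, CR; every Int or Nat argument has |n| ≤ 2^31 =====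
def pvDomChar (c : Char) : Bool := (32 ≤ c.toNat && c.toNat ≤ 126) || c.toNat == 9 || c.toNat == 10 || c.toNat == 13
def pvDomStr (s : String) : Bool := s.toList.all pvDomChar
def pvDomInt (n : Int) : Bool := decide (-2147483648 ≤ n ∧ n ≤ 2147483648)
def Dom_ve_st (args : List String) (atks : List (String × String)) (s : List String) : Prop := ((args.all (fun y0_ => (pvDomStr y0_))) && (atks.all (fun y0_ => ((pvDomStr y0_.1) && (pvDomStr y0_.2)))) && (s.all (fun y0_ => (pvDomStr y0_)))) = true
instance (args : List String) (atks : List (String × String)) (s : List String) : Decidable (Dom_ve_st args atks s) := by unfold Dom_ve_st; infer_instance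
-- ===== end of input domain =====

-- ===== PORT A =====
-- B builds the attacked-set in one pass over atks instead of A's nested rescans (return value equivalence; neither mutates its arguments).
def conflict_free (argset : List String) (atks : List (String × String)) : Bool :=
  -- for s in argset: for (a,d) in atks: if s==a and d in argset: return False; return True
  !(argset.any (fun x => atks.any (fun p => x == p.1 && argset.contains p.2)))

def ve_st (args : List String) (atks : List (String × String)) (s : List String) : Bool :=
  if conflict_free s atks then
    let setArgs := PySem.Set.ofList args
    let setS := PySem.Set.ofList s
    let diff := PySem.Set.diff setArgs s
    -- for a in diff: complement = False; for b in setS: if (b,a) in atks: complement = True; if not complement: return False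
    diff.all (fun a =>
      setS.foldl (fun complement b => if atks.contains (b, a) then true else complement) false)
  else false

-- ===== PORT B =====
-- one pass over atks: collect targets attacked from ss, abort with none on a conflict inside ss
def buildAttacked (ss : PySem.Set String) : List (String × String) → PySem.Set String → Option (PySem.Set String)
  | [], acc => some acc
  | (a, d) :: rest, acc =>
    if ss.contains a then
      if ss.contains d then none
      else buildAttacked ss rest (PySem.Set.add acc d)
    else buildAttacked ss rest acc

def ve_st_alt (args : List String) (atks : List (String × String)) (s : List String) : Bool :=
  let ss := PySem.Set.ofList s
  match buildAttacked ss atks PySem.Set.empty with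
  | none => false
  | some attacked => args.all (fun x => ss.contains x || attacked.contains x)

-- ===== PRECONDITION & SPEC =====
def Spec_ve_st (args : List String) (atks : List (String × String)) (s : List String) (out : Bool) : Prop := out = ve_st_alt args atks s
instance (args : List String) (atks : List (String × String)) (s : List String) (out : Bool) : Decidable (Spec_ve_st args atks s out) := by unfold Spec_ve_st; infer_instance

-- ===== CLAIM (what is proved, stated in full; the proofs are below) =====
def Claim_equal_ve_st : Prop := ∀ (args : List String) (atks : List (String × String)) (s : List String), Dom_ve_st args atks s → Spec_ve_st args atks s (ve_st args atks s)

-- ===== LEMMAS AND PROOFS =====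

-- A's inner flag loop is an `any`
theorem foldl_flag (atks : List (String × String)) (a : String) (l : List String) (c : Bool) :
    l.foldl (fun complement b => if atks.contains (b, a) then true else complement) c
      = (c || l.any (fun b => atks.contains (b, a))) := by
  induction l generalizing c with
  | nil => simp
  | cons hd tl ih =>
    simp only [List.foldl_cons, List.any_cons, ih]
    cases atks.contains (hd, a)
    · simp
    · simp

theorem buildAttacked_none_iff (ss : PySem.Set String) (atks : List (String × String))
    (acc : PySem.Set String) :
    buildAttacked ss atks acc = none ↔ ∃ p ∈ atks, p.1 ∈ ss ∧ p.2 ∈ ss := by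
  induction atks generalizing acc with
  | nil => simp [buildAttacked]
  | cons hd tl ih =>
    obtain ⟨a, d⟩ := hd
    simp only [buildAttacked]
    split_ifs with ha hd2
    · simp only [List.mem_cons]
      constructor
      · intro _
        exact ⟨(a, d), Or.inl rfl, (PySem.Set.contains_iff _ _).mp ha,
          (PySem.Set.contains_iff _ _).mp hd2⟩
      · intro _; trivial
    · rw [ih]
      constructor
      · rintro ⟨p, hp, h1, h2⟩; exact ⟨p, List.mem_cons_of_mem _ hp, h1, h2⟩
      · rintro ⟨p, hp, h1, h2⟩
        rcases List.mem_cons.mp hp with heq | hmem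
        · subst heq; exact absurd ((PySem.Set.contains_iff _ _).mpr h2) hd2
        · exact ⟨p, hmem, h1, h2⟩
    · rw [ih]
      constructor
      · rintro ⟨p, hp, h1, h2⟩; exact ⟨p, List.mem_cons_of_mem _ hp, h1, h2⟩
      · rintro ⟨p, hp, h1, h2⟩
        rcases List.mem_cons.mp hp with heq | hmem
        · subst heq; exact absurd ((PySem.Set.contains_iff _ _).mpr h1) ha
        · exact ⟨p, hmem, h1, h2⟩

theorem buildAttacked_some_mem (ss : PySem.Set String) (atks : List (String × String))
    (acc r : PySem.Set String) (h : buildAttacked ss atks acc = some r) (y : String) :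
    y ∈ r ↔ y ∈ acc ∨ ∃ p ∈ atks, p.1 ∈ ss ∧ p.2 ∉ ss ∧ y = p.2 := by
  induction atks generalizing acc with
  | nil =>
    simp only [buildAttacked, Option.some.injEq] at h
    subst h; simp
  | cons hd tl ih =>
    obtain ⟨a, d⟩ := hd
    simp only [buildAttacked] at h
    split_ifs at h with ha hd2
    · rw [ih _ h, PySem.Set.mem_add]
      have had : a ∈ ss := (PySem.Set.contains_iff _ _).mp ha
      have hdd : d ∉ ss := fun hm => absurd ((PySem.Set.contains_iff _ _).mpr hm) hd2
      constructor
      · rintro ((hy | hy) | ⟨p, hp, h1, h2, h3⟩)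
        · exact Or.inl hy
        · exact Or.inr ⟨(a, d), List.mem_cons_self, had, hdd, hy⟩
        · exact Or.inr ⟨p, List.mem_cons_of_mem _ hp, h1, h2, h3⟩
      · rintro (hy | ⟨p, hp, h1, h2, h3⟩)
        · exact Or.inl (Or.inl hy)
        · rcases List.mem_cons.mp hp with heq | hmem
          · subst heq; exact Or.inl (Or.inr h3)
          · exact Or.inr ⟨p, hmem, h1, h2, h3⟩
    · rw [ih _ h]
      constructor
      · rintro (hy | ⟨p, hp, h1, h2, h3⟩)
        · exact Or.inl hy
        · exact Or.inr ⟨p, List.mem_cons_of_mem _ hp, h1, h2, h3⟩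
      · rintro (hy | ⟨p, hp, h1, h2, h3⟩)
        · exact Or.inl hy
        · rcases List.mem_cons.mp hp with heq | hmem
          · subst heq
            exact absurd ((PySem.Set.contains_iff _ _).mpr h1) ha
          · exact Or.inr ⟨p, hmem, h1, h2, h3⟩

theorem ve_st_eq_alt (args : List String) (atks : List (String × String)) (s : List String) :
    ve_st args atks s = ve_st_alt args atks s := by
  cases hB : buildAttacked (PySem.Set.ofList s) atks PySem.Set.empty with
  | none =>
    have hB' : buildAttacked (PySem.Set.ofList s) atks [] = none := hB
    obtain ⟨p, hp, h1, h2⟩ := (buildAttacked_none_iff _ _ _).mp hB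
    rw [PySem.Set.mem_ofList] at h1 h2
    have hcf : conflict_free s atks = false := by
      rw [conflict_free, Bool.not_eq_false', List.any_eq_true]
      refine ⟨p.1, h1, ?_⟩
      rw [List.any_eq_true]
      exact ⟨p, hp, by simp [h2]⟩
    rw [ve_st_alt]
    simp [ve_st, hB', hcf]
  | some r =>
    have hB' : buildAttacked (PySem.Set.ofList s) atks [] = some r := hB
    have hnc : ¬ ∃ p ∈ atks, p.1 ∈ s ∧ p.2 ∈ s := by
      intro hc
      have hn : buildAttacked (PySem.Set.ofList s) atks PySem.Set.empty = none := by
        rw [buildAttacked_none_iff]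
        simpa [PySem.Set.mem_ofList] using hc
      rw [hB] at hn; exact Option.some_ne_none r hn
    have hcf : conflict_free s atks = true := by
      simp only [conflict_free, Bool.not_eq_true', List.any_eq_false]
      intro x hx h
      rw [List.any_eq_true] at h
      obtain ⟨p, hp, hb⟩ := h
      simp only [Bool.and_eq_true, beq_iff_eq, List.contains_iff_mem] at hb
      exact hnc ⟨p, hp, hb.1 ▸ hx, hb.2⟩
    have hr : ∀ y, y ∈ r ↔ ∃ p ∈ atks, p.1 ∈ s ∧ y = p.2 := by
      intro y
      rw [buildAttacked_some_mem _ _ _ _ hB y]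
      simp only [PySem.Set.mem_ofList]
      constructor
      · rintro (hy | ⟨p, hp, h1, _, h3⟩)
        · exact absurd hy List.not_mem_nil
        · exact ⟨p, hp, h1, h3⟩
      · rintro ⟨p, hp, h1, h3⟩
        exact Or.inr ⟨p, hp, h1, fun h2 => hnc ⟨p, hp, h1, h2⟩, h3⟩
    rw [ve_st_alt]
    show ve_st args atks s = (match buildAttacked (PySem.Set.ofList s) atks PySem.Set.empty with
      | none => false
      | some attacked => args.all (fun x => (PySem.Set.ofList s).contains x || attacked.contains x))
    rw [hB]
    rw [ve_st, if_pos hcf, Bool.eq_iff_iff]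
    simp only [foldl_flag]
    simp only [List.all_eq_true, PySem.Set.mem_diff, PySem.Set.mem_ofList, Bool.false_or,
      List.any_eq_true, Bool.or_eq_true, PySem.Set.contains_iff, hr, List.contains_iff_mem]
    constructor
    · intro h x hx
      by_cases hxs : x ∈ s
      · exact Or.inl hxs
      · obtain ⟨b, hb, hmem⟩ := h x ⟨hx, hxs⟩
        exact Or.inr ⟨(b, x), hmem, hb, rfl⟩
    · rintro h a ⟨ha, has⟩
      rcases h a ha with hs | ⟨p, hp, h1, h2⟩
      · exact absurd hs has
      · refine ⟨p.1, h1, ?_⟩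
        have : (p.1, a) = p := by rw [h2]
        rw [this]; exact hp

-- ===== VERDICT (by name: the statement is the Claim_ definition above) =====
theorem ve_st_spec : Claim_equal_ve_st := by
  intro args atks s _
  exact ve_st_eq_alt args atks s
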